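-- pv_equiv track=rewrite | github.com/GenBioDesign-Lab/MD_scripts | md_analysis/pdb_chain_splitter.py | get_chain_info
-- ===== SOURCE A (Python) =====
-- def get_chain_info(chains):
--     """Get information about detected chains."""
--     chain_info = {}
--     for chain_id, lines in chains.items():
--         atom_count = len([line for line in lines if line.startswith('ATOM')])
--         hetatm_count = len([line for line in lines if line.startswith('HETATM')])
--         chain_info[chain_id] = {
--             'atoms': atom_count,
--             'hetatms': hetatm_count,
--             'total': len(lines)
--         }
--     return chain_info
-- ===== SOURCE B (Python) =====
-- def get_chain_info(chains):
--     """Get information about detected chains."""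
--     chain_info = {}
--     for chain_id, lines in chains.items():
--         # index: histogram of 6-char record-type prefixes
--         hist = {}
--         for line in lines:
--             key = line[:6]
--             hist[key] = hist.get(key, 0) + 1
--         chain_info[chain_id] = {
--             'atoms': sum(n for key, n in hist.items() if key.startswith('ATOM')),
--             'hetatms': hist.get('HETATM', 0),
--             'total': len(lines),
--         }
--     return chain_info
-- ===== Notes on version B (the rewrite author's own statement) =====
-- stated objective: alternative
-- what changed: Instead of scanning each chain's lines twice with prefix predicates, B builds a per-chain histogram of 6-character record-type prefixes in one pass and then derives the counts from that index: hetatms by a single lookup hist.get('HETATM',0) and atoms by summing histogram entries whose key starts with 'ATOM'.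
import Mathlib
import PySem

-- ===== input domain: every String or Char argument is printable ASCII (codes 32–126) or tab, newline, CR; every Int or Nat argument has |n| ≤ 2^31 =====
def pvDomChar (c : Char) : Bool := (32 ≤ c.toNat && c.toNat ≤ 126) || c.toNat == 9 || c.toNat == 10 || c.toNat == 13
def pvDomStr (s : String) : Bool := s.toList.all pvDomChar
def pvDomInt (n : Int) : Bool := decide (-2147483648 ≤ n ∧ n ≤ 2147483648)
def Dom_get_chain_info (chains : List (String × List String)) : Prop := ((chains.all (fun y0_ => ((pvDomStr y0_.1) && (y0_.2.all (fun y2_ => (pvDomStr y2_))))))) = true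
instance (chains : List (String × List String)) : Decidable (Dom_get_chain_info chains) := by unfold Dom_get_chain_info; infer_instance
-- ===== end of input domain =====

-- B replaces A's two per-chain prefix scans by a histogram of 6-char record prefixes built once
-- per chain, from which both counts are derived (a lookup and a sum over distinct prefixes);
-- alternative decomposition, same cost.

-- ===== PORT A =====
def get_chain_info (chains : List (String × List String)) : List (String × List (String × Int)) :=
  (chains.foldl (fun (d : PySem.Dict String (List (String × Int))) p =>
      let atom_count : Int := ((p.2.filter (fun line => PySem.Str.startswith line "ATOM")).length : Int)
      let hetatm_count : Int := ((p.2.filter (fun line => PySem.Str.startswith line "HETATM")).length : Int)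
      d.insert p.1 [("atoms", atom_count), ("hetatms", hetatm_count), ("total", (p.2.length : Int))])
    PySem.Dict.empty).items

-- ===== PORT B =====
def get_chain_info_alt (chains : List (String × List String)) : List (String × List (String × Int)) :=
  (chains.foldl (fun (d : PySem.Dict String (List (String × Int))) p =>
      -- hist: histogram of line[:6] record-type prefixes
      let hist : PySem.Dict String Int := p.2.foldl (fun (h : PySem.Dict String Int) line =>
          let key := PySem.Str.slice line none (some 6)
          h.insert key (h.getD key 0 + 1)) PySem.Dict.empty
      d.insert p.1
        [("atoms", ((hist.items.filter (fun kv => PySem.Str.startswith kv.1 "ATOM")).map (fun kv => kv.2)).sum),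
         ("hetatms", hist.getD "HETATM" 0),
         ("total", (p.2.length : Int))])
    PySem.Dict.empty).items

-- ===== PRECONDITION & SPEC =====
def Spec_get_chain_info (chains : List (String × List String)) (out : List (String × List (String × Int))) : Prop := out = get_chain_info_alt chains
instance (chains : List (String × List String)) (out : List (String × List (String × Int))) : Decidable (Spec_get_chain_info chains out) := by unfold Spec_get_chain_info; infer_instance

-- ===== CLAIM (what is proved, stated in full; the proofs are below) =====
def Claim_equal_get_chain_info : Prop := ∀ (chains : List (String × List String)), Dom_get_chain_info chains → Spec_get_chain_info chains (get_chain_info chains)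

-- ===== LEMMAS AND PROOFS =====

-- line[:6] as a character-list function
def pvKey6 (line : String) : String := PySem.Str.slice line none (some 6)

lemma pvKey6_toList (line : String) : (pvKey6 line).toList = line.toList.take 6 := by
  simp [pvKey6, PySem.Str.slice, PySem.Chars.slice_eq_listSlice, PySem.List.slice_to]

-- startswith is invariant under truncation to 6 chars, for patterns of length at most 6
lemma pvStartswith_key6 (line : String) (pat : String) (hp : pat.toList.length <= 6) :
    PySem.Str.startswith (pvKey6 line) pat = PySem.Str.startswith line pat := by
  rw [Bool.eq_iff_iff, PySem.Str.startswith_eq, PySem.Str.startswith_eq,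
    PySem.Chars.startswith_iff, PySem.Chars.startswith_iff, pvKey6_toList,
    List.prefix_take_iff]
  exact ⟨fun h => h.1, fun h => ⟨h, hp⟩⟩

-- key6 equals the 6-char pattern exactly when the line starts with it
lemma pvKey6_eq_iff (line : String) :
    (pvKey6 line == "HETATM") = PySem.Str.startswith line "HETATM" := by
  rw [Bool.eq_iff_iff, beq_iff_eq, PySem.Str.startswith_eq, PySem.Chars.startswith_iff]
  constructor
  · intro hc
    have htl : line.toList.take 6 = ("HETATM" : String).toList := by
      rw [← pvKey6_toList, hc]
    exact htl ▸ List.take_prefix 6 line.toList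
  · intro hpre
    apply String.toList_inj.mp
    rw [pvKey6_toList]
    have := (List.prefix_iff_eq_take).mp hpre
    simpa using this.symm

-- the histogram loop is a Counter of the key-6 projections
lemma pvHist_eq_counter (ls : List String) :
    ls.foldl (fun (h : PySem.Dict String Int) line =>
        let key := PySem.Str.slice line none (some 6)
        h.insert key (h.getD key 0 + 1)) PySem.Dict.empty
      = PySem.Dict.counter (ls.map pvKey6) := by
  rw [← PySem.Dict.foldl_insert_getD_add_one_eq_counter, List.foldl_map]
  rfl

-- summing a nodup list of per-key counts over keys satisfying p gives the countP
lemma pvSum_counts (ks : List String) (p : String → Bool) :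
    (((PySem.Set.ofList ks).filter p).map (fun k => ((ks.count k : Nat) : Int))).sum
      = ((ks.countP p : Nat) : Int) := by
  have hperm : List.Perm (PySem.Set.ofList ks) ks.dedup := by
    rw [List.perm_ext_iff_of_nodup (PySem.Set.nodup_ofList ks) ks.nodup_dedup]
    intro a
    rw [PySem.Set.mem_ofList, List.mem_dedup]
  rw [((hperm.filter p).map (fun k => ((ks.count k : Nat) : Int))).sum_eq]
  have hcast : ((ks.dedup.filter p).map (fun k => ((ks.count k : Nat) : Int))).sum
      = (((ks.dedup.filter p).map (fun k => ks.count k)).sum : Int) := by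
    rw [Nat.cast_list_sum, List.map_map]
    rfl
  rw [hcast, List.sum_map_count_dedup_filter_eq_countP]

-- per-chain: B's histogram-derived atoms count equals A's filter count
lemma pvAtoms (ls : List String) :
    ((((PySem.Dict.counter (ls.map pvKey6)).items.filter
        (fun kv => PySem.Str.startswith kv.1 "ATOM")).map (fun kv => kv.2)).sum)
      = ((ls.filter (fun line => PySem.Str.startswith line "ATOM")).length : Int) := by
  rw [PySem.Dict.items_counter, List.filter_map, List.map_map]
  simp only [Function.comp_def]
  rw [pvSum_counts, List.countP_map]
  have h6 : ("ATOM" : String).toList.length <= 6 := by decide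
  have hp : ((fun k => PySem.Str.startswith k "ATOM") ∘ pvKey6)
      = fun line => PySem.Str.startswith line "ATOM" := by
    funext line
    simp only [Function.comp_apply]
    exact pvStartswith_key6 line "ATOM" h6
  rw [hp, ← List.countP_eq_length_filter]

-- per-chain: B's histogram lookup equals A's hetatm filter count
lemma pvHetatms (ls : List String) :
    (PySem.Dict.counter (ls.map pvKey6)).getD "HETATM" 0
      = ((ls.filter (fun line => PySem.Str.startswith line "HETATM")).length : Int) := by
  rw [PySem.Dict.getD_counter]
  have hc : (ls.map pvKey6).count "HETATM"
      = ls.countP (fun line => PySem.Str.startswith line "HETATM") := by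
    rw [List.count_eq_countP, List.countP_map]
    congr 1
    funext line
    exact pvKey6_eq_iff line
  rw [hc, ← List.countP_eq_length_filter]

-- ===== VERDICT (by name: the statement is the Claim_ definition above) =====
theorem get_chain_info_spec : Claim_equal_get_chain_info := by
  intro chains _
  unfold Spec_get_chain_info get_chain_info get_chain_info_alt
  have h : (fun (d : PySem.Dict String (List (String × Int))) (p : String × List String) =>
      let hist : PySem.Dict String Int := p.2.foldl (fun (h : PySem.Dict String Int) line =>
          let key := PySem.Str.slice line none (some 6)
          h.insert key (h.getD key 0 + 1)) PySem.Dict.empty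
      d.insert p.1
        [("atoms", ((hist.items.filter (fun kv => PySem.Str.startswith kv.1 "ATOM")).map (fun kv => kv.2)).sum),
         ("hetatms", hist.getD "HETATM" 0),
         ("total", (p.2.length : Int))])
    = (fun (d : PySem.Dict String (List (String × Int))) p =>
      let atom_count : Int := ((p.2.filter (fun line => PySem.Str.startswith line "ATOM")).length : Int)
      let hetatm_count : Int := ((p.2.filter (fun line => PySem.Str.startswith line "HETATM")).length : Int)
      d.insert p.1 [("atoms", atom_count), ("hetatms", hetatm_count), ("total", (p.2.length : Int))]) := by
    funext d p
    simp only [pvHist_eq_counter, pvAtoms, pvHetatms]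
  rw [h]
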